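-- pv_equiv track=rewrite | github.com/ldayton/Tongues | tongues/src/frontend/hierarchy.py | _is_exception_subclass
-- ===== SOURCE A (Python) =====
-- def _is_exception_subclass(
--     name: str,
--     class_bases: dict[str, list[str]],
--     cache: dict[str, bool],
-- ) -> bool:
--     """Check if a class is an Exception subclass (directly or transitively)."""
--     if name == "Exception":
--         return True
--     if name in cache:
--         return cache[name]
--     bases = class_bases.get(name)
--     if bases is None or len(bases) == 0:
--         cache[name] = False
--         return False
--     i = 0
--     while i < len(bases):
--         if _is_exception_subclass(bases[i], class_bases, cache):
--             cache[name] = True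
--             return True
--         i += 1
--     cache[name] = False
--     return False
-- ===== SOURCE B (Python) =====
-- def _is_exception_subclass(name, class_bases, cache):
--     """Iterative least-fixpoint: grow the set of classes known to reach Exception
--     until stable, then answer the query with one lookup. Reads cache, never writes it."""
--     true_set = set()
--     changed = True
--     while changed:
--         changed = False
--         for k, bases in class_bases.items():
--             if k in true_set or k in cache:
--                 continue
--             if any(b == "Exception" or cache.get(b) is True or b in true_set for b in bases):
--                 true_set.add(k)
--                 changed = True
--     if name == "Exception":
--         return True
--     if name in cache:
--         return cache[name]
--     return any(b == "Exception" or cache.get(b) is True or b in true_set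
--                for b in class_bases.get(name, []))
-- ===== Notes on version B (the rewrite author's own statement) =====
-- stated objective: alternative
-- what changed: Replaces the memoized recursive DFS (which writes results into the cache dict as it unwinds) with an iterative least-fixpoint computation: repeated sweeps over class_bases grow a set of classes known to reach Exception until a sweep adds nothing, then the query is answered by one lookup against that set; B reads the cache but never mutates it.
-- outside the precondition, e.g. on _is_exception_subclass('X', {'X': ['Y', 'X'], 'Y': ['Exception']}, {}): A returns True, B returns True
import Mathlib
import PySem

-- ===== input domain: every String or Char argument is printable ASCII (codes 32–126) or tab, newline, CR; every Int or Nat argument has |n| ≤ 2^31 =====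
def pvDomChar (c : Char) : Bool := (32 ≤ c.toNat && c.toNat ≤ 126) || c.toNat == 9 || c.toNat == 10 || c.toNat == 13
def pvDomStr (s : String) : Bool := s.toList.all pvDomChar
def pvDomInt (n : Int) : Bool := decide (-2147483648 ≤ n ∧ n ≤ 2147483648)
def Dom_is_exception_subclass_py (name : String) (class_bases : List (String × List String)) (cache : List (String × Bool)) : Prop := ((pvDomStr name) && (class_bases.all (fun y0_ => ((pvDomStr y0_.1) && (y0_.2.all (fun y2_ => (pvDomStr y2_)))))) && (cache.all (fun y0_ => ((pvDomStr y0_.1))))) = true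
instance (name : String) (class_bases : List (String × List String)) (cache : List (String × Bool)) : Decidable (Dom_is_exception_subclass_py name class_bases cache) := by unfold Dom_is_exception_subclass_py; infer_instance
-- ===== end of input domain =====

-- B replaces A's memoized recursive DFS by an iterative least-fixpoint sweep; equivalence is about
-- the RETURN value only: Python A writes results into the cache dict argument, Python B never mutates it.

-- ===== PORT A =====
-- A's recursion, fueled (the fuel is only a totality guard; under Pre_ it never runs out):
-- the while-loop over bases is the foldl with an early-exit flag.
def pvGoA (cb : List (String × List String)) : Nat → String → PySem.Dict String Bool → Bool × PySem.Dict String Bool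
  | 0, _, c => (false, c)
  | f + 1, name, c =>
    if name == "Exception" then (true, c)
    else
      match c.get? name with
      | some b => (b, c)
      | none =>
        match (PySem.Dict.mk cb).get? name with
        | none => (false, c.insert name false)
        | some bs =>
          if bs.isEmpty then (false, c.insert name false)
          else
            let r := bs.foldl (fun acc b => if acc.1 then acc else pvGoA cb f b acc.2) (false, c)
            if r.1 then (true, r.2.insert name true) else (false, r.2.insert name false)

def is_exception_subclass_py (name : String) (class_bases : List (String × List String)) (cache : List (String × Bool)) : Bool :=
  (pvGoA class_bases (class_bases.length + 1) name (PySem.Dict.mk cache)).1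

-- ===== PORT B =====
-- b == "Exception" or cache.get(b) is True or b in true_set
def pvGood (cache : List (String × Bool)) (t : PySem.Set String) (b : String) : Bool :=
  b == "Exception" || ((PySem.Dict.mk cache).get? b == some true) || PySem.Set.contains t b

-- one sweep of the inner for-loop over class_bases.items()
def pvSweep (cb : List (String × List String)) (cache : List (String × Bool)) (t : PySem.Set String) : PySem.Set String :=
  cb.foldl (fun t kv =>
    if PySem.Set.contains t kv.1 || ((PySem.Dict.mk cache).get? kv.1).isSome then t
    else if kv.2.any (pvGood cache t) then PySem.Set.add t kv.1 else t) t

-- the while-changed loop ('changed' ↔ the set grew; fuel cb.length+1 always suffices: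
-- every sweep but the last adds at least one of the ≤ cb.length distinct keys)
def pvLoop (cb : List (String × List String)) (cache : List (String × Bool)) : Nat → PySem.Set String → PySem.Set String
  | 0, t => t
  | f + 1, t =>
    let t' := pvSweep cb cache t
    if t'.length == t.length then t' else pvLoop cb cache f t'

def is_exception_subclass_py_alt (name : String) (class_bases : List (String × List String)) (cache : List (String × Bool)) : Bool :=
  let t := pvLoop class_bases cache (class_bases.length + 1) PySem.Set.empty
  if name == "Exception" then true
  else
    match (PySem.Dict.mk cache).get? name with
    | some b => b
    | none => ((PySem.Dict.mk class_bases).getD name []).any (pvGood cache t)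

-- ===== PRECONDITION & SPEC =====
-- A's scan of a base list never goes past a base that is literally "Exception" or cached True
-- (it returns True there at once); pvTake prunes a base list at the first such base.
def pvStop (cache : List (String × Bool)) (b : String) : Bool :=
  b == "Exception" || ((PySem.Dict.mk cache).get? b == some true)

def pvTake (cache : List (String × Bool)) : List String → List String
  | [] => []
  | b :: r => if pvStop cache b then [b] else b :: pvTake cache r

-- pvBounded f n is a SHAPE condition on the pruned inheritance graph, not a run of either program
-- (it computes no value): "every chain of uncached pruned base-edges starting at n has fewer than
-- f edges". With f = |class_bases|+1, where chains visit distinct keys, it says exactly: no cycle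
-- of uncached base-edges is reachable from name through the pruned base lists.
def pvBounded (cb : List (String × List String)) (cache : List (String × Bool)) : Nat → String → Bool
  | 0, _ => false
  | f + 1, n =>
    n == "Exception" || ((PySem.Dict.mk cache).get? n).isSome ||
      (pvTake cache ((PySem.Dict.mk cb).getD n [])).all (fun b => pvBounded cb cache f b)

-- Pre_ excludes (a) association lists with duplicate keys, which cannot arise from a Python dict, and
-- (b) inputs where A's leftmost DFS can reach a cycle of uncached base-edges before a base that is
-- literally "Exception" or cached True: on those A almost always raises RecursionError, and on the
-- rare ones where a deeper base still short-circuits first A returns True and B returns True as well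
-- (see the excluded example in the claim); that exact returning set is not closed-form.
def Pre_is_exception_subclass_py (name : String) (class_bases : List (String × List String)) (cache : List (String × Bool)) : Prop :=
  (class_bases.map Prod.fst).Nodup ∧ pvBounded class_bases cache (class_bases.length + 1) name = true
instance (name : String) (class_bases : List (String × List String)) (cache : List (String × Bool)) : Decidable (Pre_is_exception_subclass_py name class_bases cache) := by unfold Pre_is_exception_subclass_py; infer_instance

def pvWitness_is_exception_subclass_py : String × (List (String × List String)) × (List (String × Bool)) :=
  ("Dog", [("Dog", ["Err"]), ("Err", ["Exception"])], [("Cat", false)])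

def Spec_is_exception_subclass_py (name : String) (class_bases : List (String × List String)) (cache : List (String × Bool)) (out : Bool) : Prop := out = is_exception_subclass_py_alt name class_bases cache
instance (name : String) (class_bases : List (String × List String)) (cache : List (String × Bool)) (out : Bool) : Decidable (Spec_is_exception_subclass_py name class_bases cache out) := by unfold Spec_is_exception_subclass_py; infer_instance

-- ===== CLAIM (what is proved, stated in full; the proofs are below) =====
def Claim_equal_is_exception_subclass_py : Prop := ∀ (name : String) (class_bases : List (String × List String)) (cache : List (String × Bool)), Dom_is_exception_subclass_py name class_bases cache → Pre_is_exception_subclass_py name class_bases cache → Spec_is_exception_subclass_py name class_bases cache (is_exception_subclass_py name class_bases cache)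

-- ===== LEMMAS AND PROOFS =====

-- the common pure value: pvV f n = "n reaches Exception within f uncached base-steps" (reading the INITIAL cache)
def pvV (cb : List (String × List String)) (cache : List (String × Bool)) : Nat → String → Bool
  | 0, _ => false
  | f + 1, n =>
    if n == "Exception" then true
    else
      match (PySem.Dict.mk cache).get? n with
      | some b => b
      | none => ((PySem.Dict.mk cb).getD n []).any (fun b => pvV cb cache f b)

-- equation lemmas
theorem pvV_of_exc (cb : List (String × List String)) (cache : List (String × Bool)) (f : Nat) (n : String)
    (h : (n == "Exception") = true) : pvV cb cache (f+1) n = true := by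
  conv_lhs => rw [pvV]
  rw [if_pos h]
theorem pvV_of_cached (cb : List (String × List String)) (cache : List (String × Bool)) (f : Nat) (n : String) (b : Bool)
    (he : (n == "Exception") = false) (hc : (PySem.Dict.mk cache).get? n = some b) : pvV cb cache (f+1) n = b := by
  conv_lhs => rw [pvV]
  rw [if_neg (by simp [he]), hc]
theorem pvV_of_uncached (cb : List (String × List String)) (cache : List (String × Bool)) (f : Nat) (n : String)
    (he : (n == "Exception") = false) (hc : (PySem.Dict.mk cache).get? n = none) :
    pvV cb cache (f+1) n = ((PySem.Dict.mk cb).getD n []).any (fun b => pvV cb cache f b) := by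
  conv_lhs => rw [pvV]
  rw [if_neg (by simp [he]), hc]
theorem pvV_of_stop (cb : List (String × List String)) (cache : List (String × Bool)) (f : Nat) (s : String)
    (hs : pvStop cache s = true) : pvV cb cache (f+1) s = true := by
  unfold pvStop at hs
  by_cases he : (s == "Exception") = true
  · exact pvV_of_exc cb cache f s he
  · have he' : (s == "Exception") = false := by simpa using he
    rw [he'] at hs
    have hc : (PySem.Dict.mk cache).get? s = some true := by simpa using hs
    exact pvV_of_cached cb cache f s true he' hc
theorem pvGood_of_stop (cache : List (String × Bool)) (t : PySem.Set String) (s : String)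
    (hs : pvStop cache s = true) : pvGood cache t s = true := by
  unfold pvStop at hs
  unfold pvGood
  rw [Bool.or_assoc] at *
  rcases Bool.or_eq_true_iff.mp hs with h | h
  · rw [h]; rfl
  · rw [h]; simp
theorem pvTake_cons (cache : List (String × Bool)) (b : String) (r : List String) :
    pvTake cache (b :: r) = if pvStop cache b then [b] else b :: pvTake cache r := by
  simp only [pvTake]
theorem pvTake_head_mem (cache : List (String × Bool)) (a : String) (l : List String) :
    a ∈ pvTake cache (a :: l) := by
  rw [pvTake_cons]
  split_ifs <;> simp
theorem pvAny_take (cache : List (String × Bool)) (bs : List String) (P : String → Bool)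
    (hP : ∀ s, pvStop cache s = true → P s = true) : bs.any P = (pvTake cache bs).any P := by
  induction bs with
  | nil => rfl
  | cons b r ih =>
    rw [pvTake_cons]
    by_cases hs : pvStop cache b = true
    · rw [if_pos hs]
      simp [List.any_cons, hP b hs]
    · rw [if_neg hs]
      simp only [List.any_cons]
      rw [ih]
theorem pvBounded_succ (cb : List (String × List String)) (cache : List (String × Bool)) (f : Nat) (n : String) :
    pvBounded cb cache (f+1) n =
      (n == "Exception" || ((PySem.Dict.mk cache).get? n).isSome ||
        (pvTake cache ((PySem.Dict.mk cb).getD n [])).all (fun b => pvBounded cb cache f b)) := by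
  conv_lhs => rw [pvBounded]
theorem pvGoA_succ (cb : List (String × List String)) (f : Nat) (n : String) (c : PySem.Dict String Bool) :
    pvGoA cb (f+1) n c =
      (if n == "Exception" then (true, c)
       else
         match c.get? n with
         | some b => (b, c)
         | none =>
           match (PySem.Dict.mk cb).get? n with
           | none => (false, c.insert n false)
           | some bs =>
             if bs.isEmpty then (false, c.insert n false)
             else
               let r := bs.foldl (fun acc b => if acc.1 then acc else pvGoA cb f b acc.2) (false, c)
               if r.1 then (true, r.2.insert n true) else (false, r.2.insert n false)) := by
  conv_lhs => rw [pvGoA]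

theorem pvGoA_eq_exc (cb : List (String × List String)) (f : Nat) (n : String) (c : PySem.Dict String Bool)
    (he : (n == "Exception") = true) : pvGoA cb (f+1) n c = (true, c) := by
  rw [pvGoA_succ, if_pos he]
theorem pvGoA_eq_cached (cb : List (String × List String)) (f : Nat) (n : String) (c : PySem.Dict String Bool) (v : Bool)
    (he : (n == "Exception") = false) (hcc : c.get? n = some v) : pvGoA cb (f+1) n c = (v, c) := by
  rw [pvGoA_succ, if_neg (by simp [he]), hcc]
theorem pvGoA_eq_nobases (cb : List (String × List String)) (f : Nat) (n : String) (c : PySem.Dict String Bool)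
    (he : (n == "Exception") = false) (hcc : c.get? n = none) (hcb : (PySem.Dict.mk cb).get? n = none) :
    pvGoA cb (f+1) n c = (false, c.insert n false) := by
  rw [pvGoA_succ, if_neg (by simp [he]), hcc]
  rw [hcb]
theorem pvGoA_eq_empty (cb : List (String × List String)) (f : Nat) (n : String) (c : PySem.Dict String Bool)
    (bs : List String) (he : (n == "Exception") = false) (hcc : c.get? n = none)
    (hcb : (PySem.Dict.mk cb).get? n = some bs) (hbe : bs.isEmpty = true) :
    pvGoA cb (f+1) n c = (false, c.insert n false) := by
  rw [pvGoA_succ, if_neg (by simp [he]), hcc]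
  simp [hcb, hbe]
theorem pvGoA_eq_loop (cb : List (String × List String)) (f : Nat) (n : String) (c : PySem.Dict String Bool)
    (bs : List String) (he : (n == "Exception") = false) (hcc : c.get? n = none)
    (hcb : (PySem.Dict.mk cb).get? n = some bs) (hbe : bs.isEmpty = false) :
    pvGoA cb (f+1) n c =
      (if (bs.foldl (fun acc b => if acc.1 then acc else pvGoA cb f b acc.2) (false, c)).1
       then (true, (bs.foldl (fun acc b => if acc.1 then acc else pvGoA cb f b acc.2) (false, c)).2.insert n true)
       else (false, (bs.foldl (fun acc b => if acc.1 then acc else pvGoA cb f b acc.2) (false, c)).2.insert n false)) := by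
  rw [pvGoA_succ, if_neg (by simp [he]), hcc]
  simp [hcb, hbe]

theorem pvV_mono (cb : List (String × List String)) (cache : List (String × Bool)) :
    ∀ f g n, f ≤ g → pvV cb cache f n = true → pvV cb cache g n = true := by
  intro f
  induction f with
  | zero => intro g n _ h; simp [pvV] at h
  | succ f ih =>
    intro g n hfg h
    obtain ⟨g, rfl⟩ : ∃ g', g = g' + 1 := ⟨g - 1, by omega⟩
    by_cases he : (n == "Exception") = true
    · rw [pvV_of_exc _ _ _ _ he]
    · have he' : (n == "Exception") = false := by simpa using he
      cases hc : (PySem.Dict.mk cache).get? n with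
      | some b => rw [pvV_of_cached _ _ _ _ _ he' hc] at h ⊢; exact h
      | none =>
        rw [pvV_of_uncached _ _ _ _ he' hc] at h ⊢
        rw [List.any_eq_true] at h ⊢
        obtain ⟨b, hb, hv⟩ := h
        exact ⟨b, hb, ih g b (by omega) hv⟩

theorem pvV_stab (cb : List (String × List String)) (cache : List (String × Bool)) :
    ∀ f g n, f ≤ g → pvBounded cb cache f n = true → pvV cb cache g n = pvV cb cache f n := by
  intro f
  induction f with
  | zero => intro g n _ h; simp [pvBounded] at h
  | succ f ih =>
    intro g n hfg hb
    obtain ⟨g, rfl⟩ : ∃ g', g = g' + 1 := ⟨g - 1, by omega⟩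
    by_cases he : (n == "Exception") = true
    · rw [pvV_of_exc _ _ _ _ he, pvV_of_exc _ _ _ _ he]
    · have he' : (n == "Exception") = false := by simpa using he
      cases hc : (PySem.Dict.mk cache).get? n with
      | some b => rw [pvV_of_cached _ _ _ _ _ he' hc, pvV_of_cached _ _ _ _ _ he' hc]
      | none =>
        rw [pvV_of_uncached _ _ _ _ he' hc, pvV_of_uncached _ _ _ _ he' hc]
        rw [pvBounded_succ, he', hc] at hb
        simp only [Bool.false_or, Option.isSome_none, List.all_eq_true] at hb
        -- hb : every member of the pruned base list is pvBounded at fuel f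
        cases f with
        | zero =>
          have hnil : (PySem.Dict.mk cb).getD n [] = [] := by
            cases hbs0 : (PySem.Dict.mk cb).getD n [] with
            | nil => rfl
            | cons a l =>
              exfalso
              have := hb a (by rw [hbs0]; exact pvTake_head_mem cache a l)
              simp [pvBounded] at this
          rw [hnil]
          simp
        | succ f' =>
          obtain ⟨g', rfl⟩ : ∃ g'', g = g'' + 1 := ⟨g - 1, by omega⟩
          rw [pvAny_take cache _ (fun b => pvV cb cache (g'+1) b)
                (fun s hs => pvV_of_stop cb cache g' s hs),
              pvAny_take cache _ (fun b => pvV cb cache (f'+1) b)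
                (fun s hs => pvV_of_stop cb cache f' s hs)]
          rw [Bool.eq_iff_iff, List.any_eq_true, List.any_eq_true]
          constructor
          · rintro ⟨b, hbm, hv⟩
            exact ⟨b, hbm, by rw [← ih (g'+1) b (by omega) (hb b hbm)]; exact hv⟩
          · rintro ⟨b, hbm, hv⟩
            exact ⟨b, hbm, by rw [ih (g'+1) b (by omega) (hb b hbm)]; exact hv⟩

-- invariant carried through A's evolving cache: it extends the initial cache and every
-- entry (an "Exception" key is never written) holds the settled pure value
def pvInv (cb : List (String × List String)) (cache : List (String × Bool)) (c : PySem.Dict String Bool) : Prop :=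
  (∀ k v, (PySem.Dict.mk cache).get? k = some v → c.get? k = some v) ∧
  (∀ k v, k ≠ "Exception" → c.get? k = some v → v = pvV cb cache (cb.length + 1) k)

theorem pvInv_init (cb : List (String × List String)) (cache : List (String × Bool)) :
    pvInv cb cache (PySem.Dict.mk cache) := by
  refine ⟨fun k v h => h, fun k v hne h => ?_⟩
  rw [pvV_of_cached cb cache cb.length k v (by simpa using hne) h]

theorem pvInv_insert (cb : List (String × List String)) (cache : List (String × Bool))
    (c : PySem.Dict String Bool) (n : String) (v : Bool)
    (hInv : pvInv cb cache c) (hne : n ≠ "Exception")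
    (hc0 : (PySem.Dict.mk cache).get? n = none)
    (hv : v = pvV cb cache (cb.length + 1) n) :
    pvInv cb cache (c.insert n v) := by
  constructor
  · intro k w h
    rw [PySem.Dict.get?_insert]
    split_ifs with hk
    · subst hk; rw [h] at hc0; cases hc0
    · exact hInv.1 k w h
  · intro k w hkne h
    rw [PySem.Dict.get?_insert] at h
    split_ifs at h with hk
    · subst hk; cases h; exact hv
    · exact hInv.2 k w hkne h

-- once the early-exit flag is set, the rest of the base scan is skipped
theorem pvFoldA_flag_true (cb : List (String × List String)) (f : Nat) :
    ∀ (l : List String) (acc : Bool × PySem.Dict String Bool), acc.1 = true →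
      l.foldl (fun acc b => if acc.1 then acc else pvGoA cb f b acc.2) acc = acc := by
  intro l
  induction l with
  | nil => intro acc _; rfl
  | cons b r ih =>
    intro acc ha
    simp only [List.foldl_cons]
    rw [if_pos ha]
    exact ih acc ha

-- the inner while-loop (as a foldl with an early-exit flag), given the IH at fuel f;
-- only the PRUNED base list needs to be pvBounded: the scan never passes a stop base
theorem pvGoA_fold (cb : List (String × List String)) (cache : List (String × Bool)) (f : Nat)
    (ihf : ∀ n c, pvInv cb cache c → pvBounded cb cache f n = true →
      (pvGoA cb f n c).1 = pvV cb cache f n ∧ pvInv cb cache (pvGoA cb f n c).2 ∧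
      (∀ k v, c.get? k = some v → (pvGoA cb f n c).2.get? k = some v)) :
    ∀ (bs : List String) (acc : Bool × PySem.Dict String Bool), pvInv cb cache acc.2 →
      (∀ b ∈ pvTake cache bs, pvBounded cb cache f b = true) →
      (bs.foldl (fun acc b => if acc.1 then acc else pvGoA cb f b acc.2) acc).1
          = (acc.1 || bs.any (pvV cb cache f)) ∧
      pvInv cb cache (bs.foldl (fun acc b => if acc.1 then acc else pvGoA cb f b acc.2) acc).2 ∧
      (∀ k v, acc.2.get? k = some v →
        (bs.foldl (fun acc b => if acc.1 then acc else pvGoA cb f b acc.2) acc).2.get? k = some v) := by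
  intro bs
  induction bs with
  | nil => intro acc hInv _; exact ⟨by simp, hInv, fun k v h => h⟩
  | cons b rest ihr =>
    intro acc hInv hbs
    by_cases ha : acc.1 = true
    · rw [pvFoldA_flag_true cb f (b :: rest) acc ha]
      exact ⟨by rw [ha]; simp, hInv, fun k v h => h⟩
    · have ha' : acc.1 = false := by simpa using ha
      simp only [List.foldl_cons]
      rw [if_neg ha]
      by_cases hs : pvStop cache b = true
      · have hbB := hbs b (pvTake_head_mem cache b rest)
        obtain ⟨g1, g2, g3⟩ := ihf b acc.2 hInv hbB
        have hvb : pvV cb cache f b = true := by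
          cases f with
          | zero => simp [pvBounded] at hbB
          | succ f' => exact pvV_of_stop cb cache f' b hs
        have hflag : (pvGoA cb f b acc.2).1 = true := by rw [g1, hvb]
        rw [pvFoldA_flag_true cb f rest _ hflag]
        refine ⟨?_, g2, fun k v h => g3 k v h⟩
        rw [hflag, ha', List.any_cons, hvb]
        simp
      · have htk : pvTake cache (b :: rest) = b :: pvTake cache rest := by
          rw [pvTake_cons, if_neg hs]
        have hbB := hbs b (by rw [htk]; exact List.mem_cons_self)
        obtain ⟨g1, g2, g3⟩ := ihf b acc.2 hInv hbB
        obtain ⟨h1, h2, h3⟩ := ihr (pvGoA cb f b acc.2) g2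
          (fun x hx => hbs x (by rw [htk]; exact List.mem_cons_of_mem b hx))
        refine ⟨?_, h2, fun k v hk => h3 k v (g3 k v hk)⟩
        rw [h1, g1, ha']
        simp [List.any_cons]

theorem pvGoA_main (cb : List (String × List String)) (cache : List (String × Bool)) :
    ∀ f, f ≤ cb.length + 1 → ∀ n c, pvInv cb cache c → pvBounded cb cache f n = true →
      (pvGoA cb f n c).1 = pvV cb cache f n ∧ pvInv cb cache (pvGoA cb f n c).2 ∧
      (∀ k v, c.get? k = some v → (pvGoA cb f n c).2.get? k = some v) := by
  intro f
  induction f with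
  | zero => intro _ n c _ hb; simp [pvBounded] at hb
  | succ f ih =>
    intro hfN n c hInv hb
    by_cases he : (n == "Exception") = true
    · rw [pvGoA_eq_exc cb f n c he]
      exact ⟨(pvV_of_exc cb cache f n he).symm, hInv, fun k v h => h⟩
    · have he' : (n == "Exception") = false := by simpa using he
      have hne : n ≠ "Exception" := by simpa using he'
      cases hcc : c.get? n with
      | some v =>
        rw [pvGoA_eq_cached cb f n c v he' hcc]
        refine ⟨?_, hInv, fun k w h => h⟩
        show v = pvV cb cache (f+1) n
        rw [hInv.2 n v hne hcc]
        exact pvV_stab cb cache (f+1) (cb.length+1) n hfN hb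
      | none =>
        have hc0 : (PySem.Dict.mk cache).get? n = none := by
          cases hc0' : (PySem.Dict.mk cache).get? n with
          | none => rfl
          | some w => rw [hInv.1 n w hc0'] at hcc; cases hcc
        have hvfalse : ∀ _h : (PySem.Dict.mk cb).getD n [] = [],
            pvV cb cache (cb.length + 1) n = false := by
          intro h
          rw [pvV_of_uncached cb cache cb.length n he' hc0, h, List.any_nil]
        have hmono_ins : ∀ (d : PySem.Dict String Bool) (w : Bool),
            (∀ k v, c.get? k = some v → d.get? k = some v) →
            (∀ k v, c.get? k = some v → (d.insert n w).get? k = some v) := by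
          intro d w hd k v h
          rw [PySem.Dict.get?_insert]
          split_ifs with hk
          · subst hk; rw [h] at hcc; cases hcc
          · exact hd k v h
        cases hcb : (PySem.Dict.mk cb).get? n with
        | none =>
          rw [pvGoA_eq_nobases cb f n c he' hcc hcb]
          have hget : (PySem.Dict.mk cb).getD n [] = [] := PySem.Dict.getD_of_get?_eq_none _ _ hcb
          refine ⟨?_, pvInv_insert cb cache c n false hInv hne hc0 (hvfalse hget).symm,
            hmono_ins c false (fun k v h => h)⟩
          show false = pvV cb cache (f+1) n
          rw [pvV_of_uncached cb cache f n he' hc0, hget, List.any_nil]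
        | some bs =>
          have hget : (PySem.Dict.mk cb).getD n [] = bs := PySem.Dict.getD_of_get?_eq_some _ _ hcb
          by_cases hbe : bs.isEmpty = true
          · rw [pvGoA_eq_empty cb f n c bs he' hcc hcb hbe]
            have hbs : bs = [] := by simpa [List.isEmpty_iff] using hbe
            have hget' : (PySem.Dict.mk cb).getD n [] = [] := by rw [hget, hbs]
            refine ⟨?_, pvInv_insert cb cache c n false hInv hne hc0 (hvfalse hget').symm,
              hmono_ins c false (fun k v h => h)⟩
            show false = pvV cb cache (f+1) n
            rw [pvV_of_uncached cb cache f n he' hc0, hget', List.any_nil]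
          · rw [pvGoA_eq_loop cb f n c bs he' hcc hcb (by simpa using hbe)]
            have hball : ∀ b ∈ pvTake cache bs, pvBounded cb cache f b = true := by
              rw [pvBounded_succ, he', hc0, hget] at hb
              simpa using hb
            obtain ⟨h1, h2, h3⟩ := pvGoA_fold cb cache f (ih (by omega)) bs (false, c) hInv hball
            have hval : pvV cb cache (f+1) n = bs.any (pvV cb cache f) := by
              rw [pvV_of_uncached cb cache f n he' hc0, hget]
            set r := bs.foldl (fun acc b => if acc.1 then acc else pvGoA cb f b acc.2) (false, c) with hr
            have hr1 : r.1 = pvV cb cache (f+1) n := by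
              rw [h1, hval]; simp
            have hrN : r.1 = pvV cb cache (cb.length + 1) n := by
              rw [hr1]
              exact (pvV_stab cb cache (f+1) (cb.length+1) n hfN hb).symm
            by_cases hrc : r.1 = true
            · rw [if_pos hrc]
              refine ⟨?_, pvInv_insert cb cache r.2 n true h2 hne hc0 (by rw [← hrc, hrN]),
                hmono_ins r.2 true h3⟩
              show true = pvV cb cache (f+1) n
              rw [← hrc, hr1]
            · have hrc' : r.1 = false := by simpa using hrc
              rw [if_neg hrc]
              refine ⟨?_, pvInv_insert cb cache r.2 n false h2 hne hc0 (by rw [← hrc', hrN]),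
                hmono_ins r.2 false h3⟩
              show false = pvV cb cache (f+1) n
              rw [← hrc', hr1]

-- ===== B-side lemmas =====

-- one step of the sweep
theorem pvStep_prefix (_cb : List (String × List String)) (cache : List (String × Bool))
    (t : PySem.Set String) (kv : String × List String) :
    ∃ e, (if PySem.Set.contains t kv.1 || ((PySem.Dict.mk cache).get? kv.1).isSome then t
          else if kv.2.any (pvGood cache t) then PySem.Set.add t kv.1 else t) = t ++ e := by
  split_ifs with h1 h2
  · exact ⟨[], by simp⟩
  · rw [PySem.Set.add_eq_ite]
    split_ifs with h3
    · exact ⟨[], by simp⟩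
    · exact ⟨[kv.1], rfl⟩
  · exact ⟨[], by simp⟩

theorem pvFold_prefix (cb : List (String × List String)) (cache : List (String × Bool)) :
    ∀ (l : List (String × List String)) (t : PySem.Set String),
      ∃ e, l.foldl (fun t kv =>
        if PySem.Set.contains t kv.1 || ((PySem.Dict.mk cache).get? kv.1).isSome then t
        else if kv.2.any (pvGood cache t) then PySem.Set.add t kv.1 else t) t = t ++ e := by
  intro l
  induction l with
  | nil => exact fun t => ⟨[], by simp⟩
  | cons kv l ih =>
    intro t
    simp only [List.foldl_cons]
    obtain ⟨e1, he1⟩ := pvStep_prefix cb cache t kv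
    rw [he1]
    obtain ⟨e2, he2⟩ := ih (t ++ e1)
    exact ⟨e1 ++ e2, by rw [he2, List.append_assoc]⟩

theorem pvSweep_prefix (cb : List (String × List String)) (cache : List (String × Bool)) (t : PySem.Set String) :
    ∃ e, pvSweep cb cache t = t ++ e :=
  pvFold_prefix cb cache cb t

theorem pvSweep_mem (cb : List (String × List String)) (cache : List (String × Bool))
    (t : PySem.Set String) (x : String) (hx : x ∈ t) : x ∈ pvSweep cb cache t := by
  obtain ⟨e, he⟩ := pvSweep_prefix cb cache t
  rw [he]; exact List.mem_append_left _ hx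

theorem pvSweep_eq_of_len (cb : List (String × List String)) (cache : List (String × Bool))
    (t : PySem.Set String) (h : (pvSweep cb cache t).length = t.length) : pvSweep cb cache t = t := by
  obtain ⟨e, he⟩ := pvSweep_prefix cb cache t
  rw [he] at h ⊢
  rw [List.length_append] at h
  have : e = [] := List.eq_nil_of_length_eq_zero (by omega)
  rw [this, List.append_nil]

def pvIter (cb : List (String × List String)) (cache : List (String × Bool)) : Nat → PySem.Set String → PySem.Set String
  | 0, t => t
  | f + 1, t => pvSweep cb cache (pvIter cb cache f t)

theorem pvIter_fix (cb : List (String × List String)) (cache : List (String × Bool))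
    (t : PySem.Set String) (h : pvSweep cb cache t = t) : ∀ f, pvIter cb cache f t = t := by
  intro f
  induction f with
  | zero => rfl
  | succ f ih => simp only [pvIter]; rw [ih, h]

theorem pvIter_sweep (cb : List (String × List String)) (cache : List (String × Bool)) :
    ∀ f t, pvIter cb cache f (pvSweep cb cache t) = pvSweep cb cache (pvIter cb cache f t) := by
  intro f
  induction f with
  | zero => intro t; rfl
  | succ f ih => intro t; simp only [pvIter]; rw [ih]

theorem pvLoop_eq_iter (cb : List (String × List String)) (cache : List (String × Bool)) :
    ∀ f t, pvLoop cb cache f t = pvIter cb cache f t := by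
  intro f
  induction f with
  | zero => intro t; rfl
  | succ f ih =>
    intro t
    simp only [pvLoop]
    by_cases hl : ((pvSweep cb cache t).length == t.length) = true
    · rw [if_pos hl]
      have hfix : pvSweep cb cache t = t := pvSweep_eq_of_len cb cache t (by simpa using hl)
      simp only [pvIter]
      rw [pvIter_fix cb cache t hfix f, hfix]
    · rw [if_neg hl, ih]
      simp only [pvIter]
      rw [pvIter_sweep]

theorem pvIter_mem_le (cb : List (String × List String)) (cache : List (String × Bool)) :
    ∀ i j t x, i ≤ j → x ∈ pvIter cb cache i t → x ∈ pvIter cb cache j t := by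
  intro i j
  induction j with
  | zero => intro t x hij hx; have : i = 0 := by omega
            rw [this] at hx; exact hx
  | succ j ih =>
    intro t x hij hx
    by_cases h : i = j + 1
    · rw [h] at hx; exact hx
    · have : i ≤ j := by omega
      simp only [pvIter]
      exact pvSweep_mem cb cache _ x (ih t x this hx)

theorem pvGood_mono (cache : List (String × Bool)) (t t' : PySem.Set String)
    (hsub : ∀ x ∈ t, x ∈ t') (b : String) (h : pvGood cache t b = true) : pvGood cache t' b = true := by
  unfold pvGood at h ⊢
  rcases Bool.or_eq_true_iff.mp h with h' | hc
  · rw [h']; simp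
  · have : b ∈ t := by simpa [PySem.Set.contains_iff] using hc
    have : PySem.Set.contains t' b = true := by simpa [PySem.Set.contains_iff] using hsub b this
    rw [this]; simp

theorem pvGood_sound (cb : List (String × List String)) (cache : List (String × Bool))
    (t : PySem.Set String) (hs : ∀ j ∈ t, ∃ f, pvV cb cache f j = true) (b : String)
    (h : pvGood cache t b = true) : ∃ f, pvV cb cache f b = true := by
  unfold pvGood at h
  rcases Bool.or_eq_true_iff.mp h with h' | hc
  · rcases Bool.or_eq_true_iff.mp h' with he | hcache
    · exact ⟨1, pvV_of_exc cb cache 0 b he⟩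
    · have hcache' : (PySem.Dict.mk cache).get? b = some true := by simpa using hcache
      by_cases he : (b == "Exception") = true
      · exact ⟨1, pvV_of_exc cb cache 0 b he⟩
      · exact ⟨1, pvV_of_cached cb cache 0 b true (by simpa using he) hcache'⟩
  · have : b ∈ t := by simpa [PySem.Set.contains_iff] using hc
    exact hs b this

theorem pvSweep_sound (cb : List (String × List String)) (cache : List (String × Bool))
    (hnd : (cb.map Prod.fst).Nodup) :
    ∀ (l : List (String × List String)) (t : PySem.Set String), (∀ kv ∈ l, kv ∈ cb) →
      (∀ j ∈ t, ∃ f, pvV cb cache f j = true) →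
      ∀ j ∈ l.foldl (fun t kv =>
          if PySem.Set.contains t kv.1 || ((PySem.Dict.mk cache).get? kv.1).isSome then t
          else if kv.2.any (pvGood cache t) then PySem.Set.add t kv.1 else t) t,
        ∃ f, pvV cb cache f j = true := by
  intro l
  induction l with
  | nil => intro t _ hs j hj; exact hs j hj
  | cons kv l ih =>
    intro t hsub hs
    simp only [List.foldl_cons]
    apply ih _ (fun x hx => hsub x (List.mem_cons_of_mem _ hx))
    -- soundness is preserved by one step
    split_ifs with h1 h2
    · exact hs
    · intro j hj
      rcases (PySem.Set.mem_add _ _ _).mp hj with hj' | rfl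
      · exact hs j hj'
      · -- the added key kv.1
        by_cases he : (kv.1 == "Exception") = true
        · exact ⟨1, pvV_of_exc cb cache 0 kv.1 he⟩
        · have hc0 : (PySem.Dict.mk cache).get? kv.1 = none := by
            have := h1
            simp only [Bool.or_eq_true_iff, not_or] at this
            rcases Option.isSome_eq_false_iff.mp (by simpa using this.2) with h
            simpa [Option.isNone_iff_eq_none] using h
          have hmem : kv ∈ cb := hsub kv List.mem_cons_self
          have hget : (PySem.Dict.mk cb).get? kv.1 = some kv.2 := by
            apply PySem.Dict.get?_of_mem_items
            · exact hmem
            · simpa [PySem.Dict.keys] using hnd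
          obtain ⟨b, hbm, hbg⟩ := List.any_eq_true.mp h2
          obtain ⟨fb, hfb⟩ := pvGood_sound cb cache t hs b hbg
          refine ⟨fb + 1, ?_⟩
          rw [pvV_of_uncached _ _ _ _ (by simpa using he) hc0,
              PySem.Dict.getD_of_get?_eq_some _ _ hget]
          exact List.any_eq_true.mpr ⟨b, hbm, hfb⟩
    · exact hs

theorem pvIter_sound (cb : List (String × List String)) (cache : List (String × Bool))
    (hnd : (cb.map Prod.fst).Nodup) :
    ∀ i, ∀ j ∈ pvIter cb cache i PySem.Set.empty, ∃ f, pvV cb cache f j = true := by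
  intro i
  induction i with
  | zero => intro j hj; simp [pvIter, PySem.Set.empty] at hj
  | succ i ih =>
    intro j hj
    exact pvSweep_sound cb cache hnd cb _ (fun kv h => h) ih j hj

theorem pvSweep_complete (cb : List (String × List String)) (cache : List (String × Bool)) :
    ∀ (l : List (String × List String)) (t : PySem.Set String) (k : String) (bs : List String),
      (PySem.Dict.mk l).get? k = some bs → (PySem.Dict.mk cache).get? k = none →
      (∃ b ∈ bs, pvGood cache t b = true) →
      k ∈ l.foldl (fun t kv =>
        if PySem.Set.contains t kv.1 || ((PySem.Dict.mk cache).get? kv.1).isSome then t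
        else if kv.2.any (pvGood cache t) then PySem.Set.add t kv.1 else t) t := by
  intro l
  induction l with
  | nil => intro t k bs hg; simp [PySem.Dict.get?] at hg
  | cons kv l ih =>
    intro t k bs hg hc hex
    rw [PySem.Dict.get?_mk_cons] at hg
    simp only [List.foldl_cons]
    have hmem_fold : ∀ t', k ∈ t' → k ∈ l.foldl (fun t kv =>
        if PySem.Set.contains t kv.1 || ((PySem.Dict.mk cache).get? kv.1).isSome then t
        else if kv.2.any (pvGood cache t) then PySem.Set.add t kv.1 else t) t' := by
      intro t' hk
      obtain ⟨e, he⟩ := pvFold_prefix cb cache l t'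
      rw [he]; exact List.mem_append_left _ hk
    by_cases hk : (kv.1 == k) = true
    · rw [if_pos hk] at hg
      have hkeq : kv.1 = k := by simpa using hk
      have hbs : kv.2 = bs := by injection hg
      by_cases hcont : PySem.Set.contains t kv.1 = true
      · have hkmem : k ∈ t := by
          rw [PySem.Set.contains_iff] at hcont; exact hkeq ▸ hcont
        apply hmem_fold
        split_ifs
        · exact hkmem
        · exact (PySem.Set.mem_add _ _ _).mpr (Or.inl hkmem)
        · exact hkmem
      · have hcont' : PySem.Set.contains t kv.1 = false := by simpa using hcont
        have hskip : (PySem.Set.contains t kv.1 || ((PySem.Dict.mk cache).get? kv.1).isSome) = false := by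
          rw [hcont', hkeq, hc]; rfl
        rw [if_neg (by rw [hskip]; simp)]
        have hany : kv.2.any (pvGood cache t) = true := by
          obtain ⟨b, hbm, hbg⟩ := hex
          exact List.any_eq_true.mpr ⟨b, hbs ▸ hbm, hbg⟩
        rw [if_pos hany]
        exact hmem_fold _ ((PySem.Set.mem_add _ _ _).mpr (Or.inr hkeq.symm))
    · rw [if_neg hk] at hg
      -- recurse; the hypothesis transports along the growing set
      obtain ⟨e1, he1⟩ := pvStep_prefix cb cache t kv
      rw [he1]
      apply ih (t ++ e1) k bs hg hc
      obtain ⟨b, hbm, hbg⟩ := hex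
      exact ⟨b, hbm, pvGood_mono cache t (t ++ e1) (fun x hx => List.mem_append_left _ hx) b hbg⟩

theorem pvIter_complete (cb : List (String × List String)) (cache : List (String × Bool)) :
    ∀ i k, k ≠ "Exception" → (PySem.Dict.mk cache).get? k = none →
      ((PySem.Dict.mk cb).get? k).isSome = true → pvV cb cache (i + 1) k = true →
      k ∈ pvIter cb cache i PySem.Set.empty := by
  intro i
  induction i with
  | zero =>
    intro k hne hc _ hv
    rw [pvV_of_uncached _ _ _ _ (by simpa using hne) hc] at hv
    simp [pvV] at hv
  | succ i ih =>
    intro k hne hc hcb hv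
    obtain ⟨bs, hbs⟩ := Option.isSome_iff_exists.mp hcb
    rw [pvV_of_uncached _ _ _ _ (by simpa using hne) hc,
        PySem.Dict.getD_of_get?_eq_some _ _ hbs, List.any_eq_true] at hv
    obtain ⟨b, hbm, hbv⟩ := hv
    simp only [pvIter]
    apply pvSweep_complete cb cache cb _ k bs hbs hc
    refine ⟨b, hbm, ?_⟩
    by_cases hbe : (b == "Exception") = true
    · unfold pvGood; rw [hbe]; simp
    · cases hbc : (PySem.Dict.mk cache).get? b with
      | some v =>
        rw [pvV_of_cached _ _ _ _ _ (by simpa using hbe) hbc] at hbv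
        unfold pvGood
        rw [hbc, hbv]
        simp
      | none =>
        cases hbcb : (PySem.Dict.mk cb).get? b with
        | none =>
          rw [pvV_of_uncached _ _ _ _ (by simpa using hbe) hbc,
              PySem.Dict.getD_of_get?_eq_none _ _ hbcb, List.any_nil] at hbv
          cases hbv
        | some bs' =>
          have hmem := ih b (by simpa using hbe) hbc (by rw [hbcb]; rfl) hbv
          unfold pvGood
          have : PySem.Set.contains (pvIter cb cache i PySem.Set.empty) b = true := by
            rw [PySem.Set.contains_iff]; exact hmem
          rw [this]
          simp

-- ===== assembly =====

theorem pvAny_congr (l : List String) (f g : String → Bool) (h : ∀ x ∈ l, f x = g x) :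
    l.any f = l.any g := by
  rw [Bool.eq_iff_iff, List.any_eq_true, List.any_eq_true]
  constructor
  · rintro ⟨x, hx, hfx⟩; exact ⟨x, hx, (h x hx) ▸ hfx⟩
  · rintro ⟨x, hx, hgx⟩; exact ⟨x, hx, (h x hx).symm ▸ hgx⟩

-- ===== VERDICT (by name: the statement is the Claim_ definition above) =====
theorem is_exception_subclass_py_spec : Claim_equal_is_exception_subclass_py := by
  intro name cb cache _ hpre
  obtain ⟨hnd, hb⟩ := hpre
  unfold Spec_is_exception_subclass_py is_exception_subclass_py is_exception_subclass_py_alt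
  rw [pvLoop_eq_iter]
  set T := pvIter cb cache (cb.length + 1) PySem.Set.empty with hT
  by_cases he : (name == "Exception") = true
  · rw [pvGoA_eq_exc cb cb.length name (PySem.Dict.mk cache) he, if_pos he]
  · have he' : (name == "Exception") = false := by simpa using he
    rw [if_neg he]
    cases hc : (PySem.Dict.mk cache).get? name with
    | some v =>
      rw [pvGoA_eq_cached cb cb.length name (PySem.Dict.mk cache) v he' hc]
    | none =>
      -- A's top-level call at full fuel computes the pure value
      have hA := (pvGoA_main cb cache (cb.length + 1) le_rfl name (PySem.Dict.mk cache)
        (pvInv_init cb cache) hb).1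
      cases hcb : (PySem.Dict.mk cb).get? name with
      | none =>
        rw [PySem.Dict.getD_of_get?_eq_none _ _ hcb, List.any_nil]
        rw [hA, pvV_of_uncached _ _ _ _ he' hc, PySem.Dict.getD_of_get?_eq_none _ _ hcb, List.any_nil]
      | some bs =>
        rw [PySem.Dict.getD_of_get?_eq_some _ _ hcb]
        rw [hA, pvV_of_uncached _ _ _ _ he' hc, PySem.Dict.getD_of_get?_eq_some _ _ hcb]
        -- cb is nonempty here, so its length is some L+1
        have hcbne : cb ≠ [] := by
          intro h; rw [h] at hcb; simp [PySem.Dict.get?] at hcb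
        obtain ⟨L, hL⟩ : ∃ L, cb.length = L + 1 := by
          cases hcl : cb with
          | nil => exact absurd hcl hcbne
          | cons a l => exact ⟨l.length, by simp⟩
        have hball : ∀ b ∈ pvTake cache bs, pvBounded cb cache cb.length b = true := by
          rw [pvBounded_succ, he', hc, PySem.Dict.getD_of_get?_eq_some _ _ hcb] at hb
          simpa using hb
        -- prune both scans at the first syntactic stop base (both sides are true past it)
        rw [pvAny_take cache bs (fun b => pvV cb cache cb.length b)
              (fun s hs => by rw [hL]; exact pvV_of_stop cb cache L s hs),
            pvAny_take cache bs (pvGood cache T)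
              (fun s hs => pvGood_of_stop cache T s hs)]
        apply pvAny_congr
        intro b hbm
        have hbB : pvBounded cb cache cb.length b = true := hball b hbm
        rw [Bool.eq_iff_iff]
        constructor
        · intro hv
          -- pure value true ⇒ pvGood
          by_cases hbe : (b == "Exception") = true
          · unfold pvGood; rw [hbe]; simp
          · cases hbc : (PySem.Dict.mk cache).get? b with
            | some w =>
              rw [hL, pvV_of_cached _ _ _ _ _ (by simpa using hbe) hbc] at hv
              unfold pvGood; rw [hbc, hv]; simp
            | none =>
              cases hbcb : (PySem.Dict.mk cb).get? b with
              | none =>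
                rw [hL, pvV_of_uncached _ _ _ _ (by simpa using hbe) hbc,
                    PySem.Dict.getD_of_get?_eq_none _ _ hbcb, List.any_nil] at hv
                cases hv
              | some bs' =>
                have hmem : b ∈ pvIter cb cache L PySem.Set.empty := by
                  apply pvIter_complete cb cache L b (by simpa using hbe) hbc (by rw [hbcb]; rfl)
                  rw [← hL]; exact hv
                have hmem' : b ∈ T := by
                  rw [hT]
                  exact pvIter_mem_le cb cache L (cb.length + 1) PySem.Set.empty b (by omega) hmem
                have hct : PySem.Set.contains T b = true := by
                  rw [PySem.Set.contains_iff]; exact hmem'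
                unfold pvGood
                rw [hct]
                simp
        · intro hg
          -- pvGood ⇒ pure value true (via soundness and stability)
          unfold pvGood at hg
          rcases Bool.or_eq_true_iff.mp hg with hg' | hcT
          · rcases Bool.or_eq_true_iff.mp hg' with hbe | hbc
            · rw [hL]; exact pvV_of_exc cb cache L b hbe
            · have hbc' : (PySem.Dict.mk cache).get? b = some true := by simpa using hbc
              by_cases hbe : (b == "Exception") = true
              · rw [hL]; exact pvV_of_exc cb cache L b hbe
              · rw [hL]; exact pvV_of_cached cb cache L b true (by simpa using hbe) hbc'
          · have hmem : b ∈ T := by simpa [PySem.Set.contains_iff] using hcT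
            obtain ⟨f, hf⟩ := pvIter_sound cb cache hnd (cb.length + 1) b (hT ▸ hmem)
            have := pvV_mono cb cache f (max f cb.length) b (Nat.le_max_left _ _) hf
            rw [pvV_stab cb cache cb.length (max f cb.length) b (Nat.le_max_right _ _) hbB] at this
            exact this
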